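-- pv_equiv track=rewrite | github.com/quantumlib/Cirq | examples/hamiltonian_representation.py | _gray_code_comparator
-- ===== SOURCE A (Python) =====
-- def _gray_code_comparator(k1, k2, flip=False):
--     max_1 = k1[-1] if k1 else -1
--     max_2 = k2[-1] if k2 else -1
--     if max_1 != max_2:
--         return -1 if (max_1 < max_2) ^ flip else 1
--     if max_1 == -1:
--         return 0
--     return _gray_code_comparator(k1[0:-1], k2[0:-1], not flip)
-- ===== SOURCE B (Python) =====
-- def _gray_code_comparator(k1, k2, flip=False):
--     i, j = len(k1) - 1, len(k2) - 1
--     while True: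
--         a = k1[i] if i >= 0 else -1
--         b = k2[j] if j >= 0 else -1
--         if a != b:
--             return -1 if (a < b) ^ flip else 1
--         if a == -1:
--             return 0
--         i -= 1
--         j -= 1
--         flip = not flip
-- ===== Notes on version B (the rewrite author's own statement) =====
-- stated objective: faster
-- what changed: Replaced the recursive algorithm that copies both list prefixes with k[0:-1] slicing at every step by a single iterative loop walking two indices from the ends, flipping parity in place, so no intermediate lists are built.
import Mathlib
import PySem

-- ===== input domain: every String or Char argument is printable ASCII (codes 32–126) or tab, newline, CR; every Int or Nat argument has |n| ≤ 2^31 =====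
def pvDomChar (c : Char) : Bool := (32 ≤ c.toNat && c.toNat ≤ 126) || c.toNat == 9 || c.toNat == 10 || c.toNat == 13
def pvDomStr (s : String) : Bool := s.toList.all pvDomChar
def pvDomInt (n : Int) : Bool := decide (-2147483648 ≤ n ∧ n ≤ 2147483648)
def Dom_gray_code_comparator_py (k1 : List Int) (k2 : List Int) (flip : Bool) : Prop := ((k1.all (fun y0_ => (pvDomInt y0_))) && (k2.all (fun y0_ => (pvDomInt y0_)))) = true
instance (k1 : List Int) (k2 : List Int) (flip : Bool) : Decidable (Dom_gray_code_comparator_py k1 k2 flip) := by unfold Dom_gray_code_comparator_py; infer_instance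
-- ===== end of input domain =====

-- B replaces A's recursion, which copies both prefixes with k[0:-1] at every step,
-- by one index-walking loop from the ends (objective: faster).

-- ===== PORT A =====
-- 'k[-1] if k else -1' of A
def pyLastD (l : List Int) : Int := if l ≠ [] then (PySem.List.pyGet? l (-1)).getD 0 else -1

-- literal transliteration of A: compare last elements (sentinel -1), recurse on k[0:-1] with flip negated
def gray_code_comparator_py (k1 : List Int) (k2 : List Int) (flip : Bool) : Int :=
  if pyLastD k1 ≠ pyLastD k2 then (if (decide (pyLastD k1 < pyLastD k2)).xor flip then -1 else 1)
  else if pyLastD k1 = -1 then 0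
  else gray_code_comparator_py (PySem.List.slice k1 (some 0) (some (-1)))
         (PySem.List.slice k2 (some 0) (some (-1))) (!flip)
termination_by k1.length
decreasing_by
  rename_i h1 h2
  rcases k1 with _ | ⟨x, xs⟩
  · exact absurd rfl h2
  · simp [PySem.List.slice_zero_start, PySem.List.slice_to_neg_one, List.length_dropLast]

-- ===== PORT B =====
-- 'k[i] if i >= 0 else -1' of Source B (in the loop i never exceeds len(k)-1)
def pyIdxD (l : List Int) (i : Int) : Int := if 0 ≤ i then (PySem.List.pyGet? l i).getD 0 else -1

-- the while-loop of Source B: i, j walk down from the ends, flip toggles each step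
def grayLoop (k1 : List Int) (k2 : List Int) (i : Int) (j : Int) (flip : Bool) : Int :=
  if pyIdxD k1 i ≠ pyIdxD k2 j then (if (decide (pyIdxD k1 i < pyIdxD k2 j)).xor flip then -1 else 1)
  else if pyIdxD k1 i = -1 then 0
  else grayLoop k1 k2 (i - 1) (j - 1) (!flip)
termination_by (i + 1).toNat
decreasing_by
  rename_i _ h2
  by_cases hi : 0 ≤ i
  · omega
  · exact absurd (by unfold pyIdxD; simp [hi]) h2

def gray_code_comparator_py_alt (k1 : List Int) (k2 : List Int) (flip : Bool) : Int :=
  grayLoop k1 k2 ((k1.length : Int) - 1) ((k2.length : Int) - 1) flip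

-- ===== PRECONDITION & SPEC =====
def Spec_gray_code_comparator_py (k1 : List Int) (k2 : List Int) (flip : Bool) (out : Int) : Prop := out = gray_code_comparator_py_alt k1 k2 flip
instance (k1 : List Int) (k2 : List Int) (flip : Bool) (out : Int) : Decidable (Spec_gray_code_comparator_py k1 k2 flip out) := by unfold Spec_gray_code_comparator_py; infer_instance

-- ===== CLAIM (what is proved, stated in full; the proofs are below) =====
def Claim_equal_gray_code_comparator_py : Prop := ∀ (k1 : List Int) (k2 : List Int) (flip : Bool), Dom_gray_code_comparator_py k1 k2 flip → Spec_gray_code_comparator_py k1 k2 flip (gray_code_comparator_py k1 k2 flip)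

-- ===== LEMMAS AND PROOFS =====

-- the last-element-or-(-1) of A is Source B's read at index length-1
theorem pyLastD_eq_pyIdxD (l : List Int) : pyLastD l = pyIdxD l ((l.length : Int) - 1) := by
  rcases l with _ | ⟨x, xs⟩
  · simp [pyLastD, pyIdxD]
  · have h0 : (0 : Int) ≤ ((x :: xs).length : Int) - 1 := by simp
    simp only [pyLastD, pyIdxD, ne_eq, reduceCtorEq, not_false_eq_true, if_true, h0,
      PySem.List.pyGet?_neg_one, PySem.List.pyGet?_of_nonneg _ h0, List.getLast?_eq_getElem?]
    congr 1
    simp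

-- reading a valid index is unchanged by dropping the last element
theorem pyIdxD_dropLast (l : List Int) (i : Int) (h : i < (l.length : Int) - 1) :
    pyIdxD l.dropLast i = pyIdxD l i := by
  unfold pyIdxD
  by_cases h0 : 0 ≤ i
  · simp only [h0, if_true, PySem.List.pyGet?_of_nonneg _ h0, List.getElem?_dropLast]
    have : i.toNat < l.length - 1 := by omega
    simp [this]
  · simp [h0]

-- grayLoop only reads indices ≤ i / ≤ j, so dropping the last elements beyond them is invisible
theorem grayLoop_dropLast (k1 k2 : List Int) :
    ∀ (n : Nat) (i j : Int) (flip : Bool), (i + 1).toNat = n →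
      i < (k1.length : Int) - 1 → j < (k2.length : Int) - 1 →
      grayLoop k1.dropLast k2.dropLast i j flip = grayLoop k1 k2 i j flip := by
  intro n
  induction n using Nat.strong_induction_on with
  | _ n ih =>
    intro i j flip hn hi hj
    conv_lhs => rw [grayLoop]
    conv_rhs => rw [grayLoop]
    rw [pyIdxD_dropLast k1 i hi, pyIdxD_dropLast k2 j hj]
    split_ifs with h1 h2 h3
    · rfl
    · rfl
    · rfl
    · have hi0 : 0 ≤ i := by
        by_contra h
        exact absurd (by unfold pyIdxD; simp [h]) h3
      exact ih i.toNat (by omega) (i - 1) (j - 1) (!flip) (by omega) (by omega) (by omega)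

-- A's recursion computes exactly B's loop started at the last indices
theorem gray_eq_loop :
    ∀ (n : Nat) (k1 k2 : List Int) (flip : Bool), k1.length = n →
      gray_code_comparator_py k1 k2 flip
        = grayLoop k1 k2 ((k1.length : Int) - 1) ((k2.length : Int) - 1) flip := by
  intro n
  induction n using Nat.strong_induction_on with
  | _ n ih =>
    intro k1 k2 flip hn
    conv_lhs => rw [gray_code_comparator_py]
    conv_rhs => rw [grayLoop]
    rw [pyLastD_eq_pyIdxD k1, pyLastD_eq_pyIdxD k2]
    split_ifs with h1 h2 h3
    · rfl
    · rfl
    · rfl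
    · -- recursive case: both lists are nonempty, tails match by grayLoop_dropLast
      have hk1 : k1 ≠ [] := by
        intro h; subst h
        exact absurd (by unfold pyIdxD; norm_num) h3
      have hk2 : k2 ≠ [] := by
        intro h; subst h
        apply h3
        rw [not_ne_iff.mp h1]  -- pyIdxD [] (-1) = -1
        unfold pyIdxD; norm_num
      have hl1 : 0 < k1.length := List.length_pos_iff.mpr hk1
      have hl2 : 0 < k2.length := List.length_pos_iff.mpr hk2
      simp only [PySem.List.slice_zero_start, PySem.List.slice_to_neg_one]
      rw [ih k1.dropLast.length (by simp [List.length_dropLast]; omega) k1.dropLast k2.dropLast (!flip) rfl]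
      rw [grayLoop_dropLast k1 k2 ((k1.dropLast.length : Int) - 1 + 1).toNat _ _ _ rfl
        (by simp [List.length_dropLast]; omega)
        (by simp [List.length_dropLast]; omega)]
      congr 1 <;> · simp [List.length_dropLast]; omega

-- ===== VERDICT (by name: the statement is the Claim_ definition above) =====
theorem gray_code_comparator_py_spec : Claim_equal_gray_code_comparator_py := by
  intro k1 k2 flip _
  unfold Spec_gray_code_comparator_py gray_code_comparator_py_alt
  exact gray_eq_loop k1.length k1 k2 flip rfl
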